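-- pv_equiv track=rewrite | github.com/RileyPaddock/machine-learning | src/dataframe.py | get_data_from_list_entry
-- ===== SOURCE A (Python) =====
-- def get_data_from_list_entry(data):
--     entries = []
--     for data_set in data:
--         for entry in data_set:
--             if entry not in entries:
--                 entries.append(entry)
--     new_columns = []
--     for entry in entries:
--         new_columns.append([])
--         for data_set in data:
--             if entry in data_set:
--                 new_columns[entries.index(entry)].append(1)
--             else:
--                 new_columns[entries.index(entry)].append(0)
--     return new_columns
-- ===== SOURCE B (Python) =====
-- def get_data_from_list_entry(data):
--     entries = []
--     pos = {}
--     for data_set in data: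
--         for entry in data_set:
--             if entry not in pos:
--                 pos[entry] = len(entries)
--                 entries.append(entry)
--     n = len(data)
--     rows = [[0] * n for _ in entries]
--     for d, data_set in enumerate(data):
--         for entry in data_set:
--             rows[pos[entry]][d] = 1
--     return rows
-- ===== Notes on version B (the rewrite author's own statement) =====
-- stated objective: faster
-- what changed: Replaces A's gather (for every unique entry, rescan every dataset for membership and re-run entries.index per cell) with a single build of an entry->row-index dict and a one-pass scatter of 1s into a preallocated zero matrix.
import Mathlib
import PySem

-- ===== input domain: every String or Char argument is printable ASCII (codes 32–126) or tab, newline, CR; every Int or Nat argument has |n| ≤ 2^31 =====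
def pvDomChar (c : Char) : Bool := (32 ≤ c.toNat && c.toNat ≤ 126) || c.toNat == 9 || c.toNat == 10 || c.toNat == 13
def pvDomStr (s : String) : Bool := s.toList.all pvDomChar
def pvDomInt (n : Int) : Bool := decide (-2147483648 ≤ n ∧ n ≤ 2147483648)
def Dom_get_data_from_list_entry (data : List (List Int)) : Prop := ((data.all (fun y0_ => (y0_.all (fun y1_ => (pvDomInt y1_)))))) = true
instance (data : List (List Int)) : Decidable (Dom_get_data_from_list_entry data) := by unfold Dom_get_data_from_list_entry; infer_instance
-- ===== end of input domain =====

-- B replaces A's per-cell membership gather (one scan of every dataset per unique entry per cell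
-- row) by a single-pass scatter of 1s into a preallocated zero matrix, with a dict giving each
-- entry's row index.

-- ===== PORT A =====
-- Literal transliteration of A.  `entries.index(entry)` always succeeds (entry ∈ entries), so
-- `(index? …).getD 0` never takes its default.
def get_data_from_list_entry (data : List (List Int)) : List (List Int) :=
  let entries := data.foldl (fun es data_set =>
    data_set.foldl (fun es entry => if entry ∈ es then es else es ++ [entry]) es) []
  entries.foldl (fun new_columns entry =>
    data.foldl (fun new_columns data_set =>
      if entry ∈ data_set then
        new_columns.modify ((PySem.List.index? entries entry).getD 0) (fun r => r ++ [(1 : Int)])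
      else
        new_columns.modify ((PySem.List.index? entries entry).getD 0) (fun r => r ++ [(0 : Int)]))
      (new_columns ++ [[]])) []

-- ===== PORT B =====
-- Literal transliteration of Source B: one fold builds (entries, pos) together; rows is preallocated
-- as len(entries) zero rows of width len(data); the enumerate-fold scatters 1s.  `pos[entry]`
-- always hits (every entry was registered) and `rows[pos[entry]][d] = 1` is always in range, so
-- `(get? …).getD 0` never takes its default and `List.set` never clamps.
def get_data_from_list_entry_alt (data : List (List Int)) : List (List Int) :=
  let st := data.foldl (fun (st : List Int × PySem.Dict Int Int) data_set =>
    data_set.foldl (fun st entry =>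
      if (st.2.get? entry).isSome then st
      else (st.1 ++ [entry], st.2.insert entry (st.1.length : Int))) st)
    ([], PySem.Dict.empty)
  let n := data.length
  let rows := st.1.map (fun _ => List.replicate n (0 : Int))
  (PySem.List.enumerate data).foldl (fun rows p =>
    p.2.foldl (fun rows entry =>
      rows.modify ((st.2.get? entry).getD 0).toNat (fun r => r.set p.1.toNat (1 : Int))) rows) rows

-- ===== PRECONDITION & SPEC =====
def Spec_get_data_from_list_entry (data : List (List Int)) (out : List (List Int)) : Prop := out = get_data_from_list_entry_alt data
instance (data : List (List Int)) (out : List (List Int)) : Decidable (Spec_get_data_from_list_entry data out) := by unfold Spec_get_data_from_list_entry; infer_instance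

-- ===== CLAIM (what is proved, stated in full; the proofs are below) =====
def Claim_equal_get_data_from_list_entry : Prop := ∀ (data : List (List Int)), Dom_get_data_from_list_entry data → Spec_get_data_from_list_entry data (get_data_from_list_entry data)

-- ===== LEMMAS AND PROOFS =====
def pvDedupStep (es : List Int) (e : Int) : List Int := if e ∈ es then es else es ++ [e]
theorem pv_mem_dedup_acc (ds : List Int) : ∀ es : List Int, ∀ x ∈ es, x ∈ ds.foldl pvDedupStep es := by
  induction ds with
  | nil => intro es x hx; simpa using hx
  | cons a t ih =>
    intro es x hx
    simp only [List.foldl_cons]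
    apply ih
    unfold pvDedupStep
    split
    · exact hx
    · exact List.mem_append_left _ hx
theorem pv_mem_dedup (ds : List Int) : ∀ es : List Int, ∀ x ∈ ds, x ∈ ds.foldl pvDedupStep es := by
  induction ds with
  | nil => intro es x hx; simp at hx
  | cons a t ih =>
    intro es x hx
    simp only [List.foldl_cons]
    rcases List.mem_cons.mp hx with h | h
    · subst h
      apply pv_mem_dedup_acc
      unfold pvDedupStep
      split
      · assumption
      · simp
    · exact ih _ x h
theorem pv_nodup_dedup (ds : List Int) : ∀ es : List Int, es.Nodup → (ds.foldl pvDedupStep es).Nodup := by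
  induction ds with
  | nil => intro es h; simpa using h
  | cons a t ih =>
    intro es h
    simp only [List.foldl_cons]
    apply ih
    unfold pvDedupStep
    split
    · exact h
    · rw [List.nodup_append]
      exact ⟨h, List.nodup_singleton a, fun x hx b hb hxa => ‹a ∉ es› ((List.mem_singleton.mp hb) ▸ hxa ▸ hx)⟩
theorem pv_modify_append_length {β : Type} (l : List β) (r : β) (t : List β) (f : β → β) :
    (l ++ r :: t).modify l.length f = l ++ f r :: t := by
  induction l with
  | nil => simp [List.modify]
  | cons a l ih => simpa using ih
theorem pv_set_append_length (l : List Int) (r : Int) (t : List Int) (v : Int) :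
    (l ++ r :: t).set l.length v = l ++ v :: t := by
  induction l with
  | nil => simp
  | cons a l ih => simp
theorem pv_modify_map {β : Type} (es : List Int) (hn : es.Nodup) (e : Int) (k : Nat)
    (hk : PySem.List.index? es e = some k) (f : Int → β) (u : β → β) :
    (es.map f).modify k u = es.map (fun x => if x = e then u (f x) else f x) := by
  obtain ⟨pre, suf, hes, hlen, hpre⟩ := (PySem.List.index?_eq_some_iff es e k).mp hk
  subst hes
  have hsuf : e ∉ suf := by
    have h2 := (List.nodup_append.mp hn).2.1
    simpa using (List.nodup_cons.mp h2).1
  have hL : pre.length = (List.map f pre).length := (List.length_map _).symm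
  rw [List.map_append, List.map_cons, ← hlen, hL, pv_modify_append_length]
  rw [List.map_append, List.map_cons]
  congr 1
  · apply List.map_congr_left; intro x hx
    have : x ≠ e := fun h => hpre (h ▸ hx)
    simp [this]
  · congr 1
    · simp
    · apply List.map_congr_left; intro x hx
      have : x ≠ e := fun h => hsuf (h ▸ hx)
      simp [this]
def pvEntries (data : List (List Int)) : List Int :=
  data.foldl (fun es ds => ds.foldl pvDedupStep es) []
def pvRow (data : List (List Int)) (e : Int) : List Int :=
  data.map (fun ds => if e ∈ ds then (1 : Int) else 0)

theorem pv_nodup_entries (data : List (List Int)) : (pvEntries data).Nodup := by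
  unfold pvEntries
  have aux : ∀ (dl : List (List Int)) (es : List Int), es.Nodup →
      (dl.foldl (fun es ds => ds.foldl pvDedupStep es) es).Nodup := by
    intro dl
    induction dl with
    | nil => intro es h; simpa using h
    | cons d t ih => intro es h; simp only [List.foldl_cons]; exact ih _ (pv_nodup_dedup d es h)
  exact aux data [] (by simp)

theorem pv_subset_entries (data : List (List Int)) :
    ∀ ds ∈ data, ∀ e ∈ ds, e ∈ pvEntries data := by
  unfold pvEntries
  have aux0 : ∀ (dl : List (List Int)) (es : List Int), ∀ x ∈ es,
      x ∈ dl.foldl (fun es ds => ds.foldl pvDedupStep es) es := by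
    intro dl
    induction dl with
    | nil => intro es x hx; simpa using hx
    | cons d t ih => intro es x hx; simp only [List.foldl_cons]; exact ih _ x (pv_mem_dedup_acc d es x hx)
  have aux : ∀ (dl : List (List Int)) (es : List Int), ∀ ds ∈ dl, ∀ e ∈ ds,
      e ∈ dl.foldl (fun es ds => ds.foldl pvDedupStep es) es := by
    intro dl
    induction dl with
    | nil => intro es ds h; simp at h
    | cons d t ih =>
      intro es ds hds e he
      simp only [List.foldl_cons]
      rcases List.mem_cons.mp hds with h | h
      · exact aux0 t _ e (pv_mem_dedup d es e (h ▸ he))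
      · exact ih _ ds h e he
  exact aux data []

theorem pv_innerA (data : List (List Int)) (e : Int) (k : Nat) :
    ∀ (pref : List (List Int)) (r : List Int), pref.length = k →
    data.foldl (fun nc ds =>
      if e ∈ ds then nc.modify k (fun r => r ++ [(1 : Int)])
      else nc.modify k (fun r => r ++ [(0 : Int)])) (pref ++ [r])
    = pref ++ [r ++ pvRow data e] := by
  induction data with
  | nil => intro pref r h; simp [pvRow]
  | cons ds t ih =>
    intro pref r h
    simp only [List.foldl_cons]
    by_cases hm : e ∈ ds
    · rw [if_pos hm, ← h, pv_modify_append_length, h, ih pref (r ++ [(1:Int)]) h]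
      simp [pvRow, hm]
    · rw [if_neg hm, ← h, pv_modify_append_length, h, ih pref (r ++ [(0:Int)]) h]
      simp [pvRow, hm]

theorem pv_outerA (data : List (List Int)) (entries : List Int) (hn : entries.Nodup) :
    ∀ (q p : List Int), entries = p ++ q →
    q.foldl (fun nc e =>
      data.foldl (fun nc ds =>
        if e ∈ ds then nc.modify ((PySem.List.index? entries e).getD 0) (fun r => r ++ [(1 : Int)])
        else nc.modify ((PySem.List.index? entries e).getD 0) (fun r => r ++ [(0 : Int)]))
        (nc ++ [[]])) (p.map (pvRow data))
    = entries.map (pvRow data) := by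
  intro q
  induction q with
  | nil => intro p h; simp only [List.append_nil] at h; rw [h]; rfl
  | cons e q ih =>
    intro p h
    have hep : e ∉ p := by
      have hn' := hn
      rw [h] at hn'
      intro hp
      rcases List.nodup_append.mp hn' with ⟨_, _, hd⟩
      exact hd e hp e (by simp) rfl
    have hidx : PySem.List.index? entries e = some p.length :=
      (PySem.List.index?_eq_some_iff entries e p.length).mpr ⟨p, q, h, rfl, hep⟩
    simp only [List.foldl_cons, hidx, Option.getD_some]
    have hpref : (p.map (pvRow data)).length = p.length := List.length_map _
    rw [show p.map (pvRow data) ++ [[]] = p.map (pvRow data) ++ [([] : List Int)] from rfl]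
    rw [pv_innerA data e p.length (p.map (pvRow data)) [] hpref]
    have : p.map (pvRow data) ++ [[] ++ pvRow data e] = (p ++ [e]).map (pvRow data) := by simp
    rw [this]
    exact ih (p ++ [e]) (by rw [h]; simp)

theorem pv_A_eq (data : List (List Int)) :
    get_data_from_list_entry data = (pvEntries data).map (pvRow data) := by
  have h := pv_outerA data (pvEntries data) (pv_nodup_entries data) (pvEntries data) [] rfl
  simp only [List.map_nil] at h
  exact h
def pvInv (st : List Int × PySem.Dict Int Int) : Prop :=
  ∀ x : Int, st.2.get? x = (PySem.List.index? st.1 x).map (fun k => (k : Int))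

theorem pv_buildInner (ds : List Int) : ∀ st : List Int × PySem.Dict Int Int, pvInv st →
    (ds.foldl (fun st entry =>
      if (st.2.get? entry).isSome then st
      else (st.1 ++ [entry], st.2.insert entry (st.1.length : Int))) st).1
      = ds.foldl pvDedupStep st.1
    ∧ pvInv (ds.foldl (fun st entry =>
      if (st.2.get? entry).isSome then st
      else (st.1 ++ [entry], st.2.insert entry (st.1.length : Int))) st) := by
  induction ds with
  | nil => intro st h; exact ⟨rfl, h⟩
  | cons e t ih =>
    intro st h
    simp only [List.foldl_cons]
    by_cases he : e ∈ st.1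
    · have hs : (st.2.get? e).isSome = true := by
        rw [h e]
        have h2 : (PySem.List.index? st.1 e).isSome = true := (PySem.List.index?_isSome_iff _ _).mpr he
        rcases Option.isSome_iff_exists.mp h2 with ⟨k, hk⟩
        rw [hk]
        rfl
      have hstep : pvDedupStep st.1 e = st.1 := by unfold pvDedupStep; rw [if_pos he]
      rw [hs, if_pos rfl, hstep]
      exact ih st h
    · have hnone : st.2.get? e = none := by
        rw [h e, (PySem.List.index?_eq_none_iff _ _).mpr he]
        rfl
      have hstep : pvDedupStep st.1 e = st.1 ++ [e] := by unfold pvDedupStep; rw [if_neg he]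
      rw [hnone]
      simp only [Option.isSome_none, Bool.false_eq_true, if_false, hstep]
      apply ih
      intro x
      by_cases hx : x = e
      · subst hx
        rw [PySem.Dict.get?_insert_self, PySem.List.index?_append_singleton_self _ _ he]
        rfl
      · rw [PySem.Dict.get?_insert_of_ne _ _ hx, h x]
        congr 1
        by_cases hxs : x ∈ st.1
        · exact (PySem.List.index?_append_of_mem _ hxs).symm ▸ rfl
        · rw [(PySem.List.index?_eq_none_iff _ _).mpr hxs,
              (PySem.List.index?_eq_none_iff _ _).mpr (by simp [hxs, hx])]

theorem pv_buildOuter (data : List (List Int)) : ∀ st : List Int × PySem.Dict Int Int, pvInv st →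
    (data.foldl (fun st data_set =>
      data_set.foldl (fun st entry =>
        if (st.2.get? entry).isSome then st
        else (st.1 ++ [entry], st.2.insert entry (st.1.length : Int))) st) st).1
      = data.foldl (fun es ds => ds.foldl pvDedupStep es) st.1
    ∧ pvInv (data.foldl (fun st data_set =>
      data_set.foldl (fun st entry =>
        if (st.2.get? entry).isSome then st
        else (st.1 ++ [entry], st.2.insert entry (st.1.length : Int))) st) st) := by
  induction data with
  | nil => intro st h; exact ⟨rfl, h⟩
  | cons ds t ih =>
    intro st h
    simp only [List.foldl_cons]
    obtain ⟨h1, h2⟩ := pv_buildInner ds st h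
    obtain ⟨h3, h4⟩ := ih _ h2
    exact ⟨by rw [h3, h1], h4⟩
theorem pv_scatterInner (entries : List Int) (hn : entries.Nodup) (idx : Int → Nat)
    (hidx : ∀ e ∈ entries, PySem.List.index? entries e = some (idx e))
    (d : Nat) (pre post : Int → List Int) (hpre : ∀ e, (pre e).length = d) :
    ∀ (ds : List Int), (∀ e ∈ ds, e ∈ entries) → ∀ (cur : Int → Int),
    ds.foldl (fun rows e => rows.modify (idx e) (fun r => r.set d (1 : Int)))
      (entries.map (fun e => pre e ++ cur e :: post e))
    = entries.map (fun e => pre e ++ (if e ∈ ds then (1 : Int) else cur e) :: post e) := by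
  intro ds
  induction ds with
  | nil => intro _ cur; simp
  | cons a t ih =>
    intro hsub cur
    simp only [List.foldl_cons]
    have ha : a ∈ entries := hsub a (by simp)
    rw [pv_modify_map entries hn a (idx a) (hidx a ha)
      (fun e => pre e ++ cur e :: post e) (fun r => r.set d (1 : Int))]
    have hfun : (fun x => if x = a then ((pre x ++ cur x :: post x).set d (1 : Int))
        else pre x ++ cur x :: post x)
        = fun x => pre x ++ (if x = a then (1 : Int) else cur x) :: post x := by
      funext x
      by_cases hx : x = a
      · rw [if_pos hx, if_pos hx, ← hpre x, pv_set_append_length]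
      · rw [if_neg hx, if_neg hx]
    rw [hfun, ih (fun e he => hsub e (List.mem_cons_of_mem _ he)) (fun x => if x = a then 1 else cur x)]
    apply List.map_congr_left
    intro x _
    by_cases h1 : x ∈ t <;> by_cases h2 : x = a <;> simp [List.mem_cons, h1, h2]

theorem pv_scatterOuter (entries : List Int) (hn : entries.Nodup) (idx : Int → Nat)
    (hidx : ∀ e ∈ entries, PySem.List.index? entries e = some (idx e)) :
    ∀ (tail : List (List Int)), (∀ ds ∈ tail, ∀ e ∈ ds, e ∈ entries) →
    ∀ (s : Nat) (pre : Int → List Int), (∀ e, (pre e).length = s) →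
    (PySem.List.enumerate tail (s : Int)).foldl (fun rows p =>
      p.2.foldl (fun rows e => rows.modify (idx e) (fun r => r.set p.1.toNat (1 : Int))) rows)
      (entries.map (fun e => pre e ++ List.replicate tail.length (0 : Int)))
    = entries.map (fun e => pre e ++ tail.map (fun ds => if e ∈ ds then (1 : Int) else 0)) := by
  intro tail
  induction tail with
  | nil => intro _ s pre hpre; simp [PySem.List.enumerate]
  | cons ds t ih =>
    intro hsub s pre hpre
    rw [PySem.List.enumerate_cons]
    simp only [List.foldl_cons, List.length_cons, List.replicate_succ]
    have hsnat : ((s : Int)).toNat = s := Int.toNat_natCast s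
    simp only [hsnat]
    rw [pv_scatterInner entries hn idx hidx s pre (fun _ => List.replicate t.length (0 : Int)) hpre
      ds (hsub ds (by simp)) (fun _ => 0)]
    have hcast : (s : Int) + 1 = ((s + 1 : Nat) : Int) := by push_cast; ring
    rw [hcast]
    have hshape : (entries.map (fun e => pre e ++ (if e ∈ ds then (1:Int) else 0) :: List.replicate t.length (0:Int)))
        = entries.map (fun e => (pre e ++ [if e ∈ ds then (1:Int) else 0]) ++ List.replicate t.length (0:Int)) := by
      apply List.map_congr_left; intro x _; simp
    rw [hshape, ih (fun ds' hds' => hsub ds' (List.mem_cons_of_mem _ hds'))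
      (s + 1) (fun e => pre e ++ [if e ∈ ds then (1:Int) else 0]) (by intro e; simp [hpre e])]
    apply List.map_congr_left; intro x _; simp

theorem pv_B_eq (data : List (List Int)) :
    get_data_from_list_entry_alt data = (pvEntries data).map (pvRow data) := by
  unfold get_data_from_list_entry_alt
  dsimp only
  have hbase : pvInv ([], PySem.Dict.empty) := by
    intro x
    rw [(PySem.List.index?_eq_none_iff ([] : List Int) x).mpr (by simp)]
    rfl
  obtain ⟨h1, h2⟩ := pv_buildOuter data ([], PySem.Dict.empty) hbase
  set st := data.foldl (fun (st : List Int × PySem.Dict Int Int) data_set =>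
    data_set.foldl (fun st entry =>
      if (st.2.get? entry).isSome then st
      else (st.1 ++ [entry], st.2.insert entry (st.1.length : Int))) st)
    ([], PySem.Dict.empty) with hst
  have hentries : st.1 = pvEntries data := h1
  have hidx : ∀ e ∈ pvEntries data,
      PySem.List.index? (pvEntries data) e = some (((st.2.get? e).getD 0).toNat) := by
    intro e he
    have hsome : (PySem.List.index? (pvEntries data) e).isSome = true :=
      (PySem.List.index?_isSome_iff _ _).mpr he
    rcases Option.isSome_iff_exists.mp hsome with ⟨k, hk⟩
    have : st.2.get? e = some (k : Int) := by
      rw [h2 e, hentries, hk]; rfl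
    rw [this, hk]
    simp
  have hrows : st.1.map (fun _ => List.replicate data.length (0 : Int))
      = (pvEntries data).map (fun e => (fun _ : Int => ([] : List Int)) e ++ List.replicate data.length (0 : Int)) := by
    rw [hentries]
    apply List.map_congr_left; intro x _; simp
  have hs := pv_scatterOuter (pvEntries data) (pv_nodup_entries data)
    (fun e => ((st.2.get? e).getD 0).toNat) hidx data (pv_subset_entries data)
    0 (fun _ => []) (fun e => rfl)
  rw [Nat.cast_zero] at hs
  rw [hrows, hs]
  apply List.map_congr_left; intro x _; simp [pvRow]

-- ===== VERDICT (by name: the statement is the Claim_ definition above) =====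
theorem get_data_from_list_entry_spec : Claim_equal_get_data_from_list_entry := by
  intro data _
  unfold Spec_get_data_from_list_entry
  rw [pv_A_eq, pv_B_eq]
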